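-- pv_equiv track=rewrite | github.com/Injent/s | 5.py | f
-- ===== SOURCE A (Python) =====
-- def f(n):
--     bin_str = bin(n)
--
--     for i in range(0, 2):
--         if n % 2 == 0:  # если четное, то справа записывается 11
--             bin_str = bin_str + "11"
--         else:  # если четное, то справа записывается 0
--             bin_str = bin_str + "0"
--
--     return int(bin_str, 2)  # конвертируется в десятичную запись из двоичной
-- ===== SOURCE B (Python) =====
-- def f(n):
--     # closed form: appending "1111"/"00" to bin(n) is *16+15 / *4 on the magnitude
--     sign = -1 if n < 0 else 1
--     a = abs(n)
--     return sign * (a * 16 + 15) if n % 2 == 0 else sign * (a * 4)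
-- ===== Notes on version B (the rewrite author's own statement) =====
-- stated objective: simpler
-- what changed: B replaces bin()/string-append/int(...,2) string surgery with a closed-form arithmetic formula: sign(n)*(|n|*16+15) for even n, sign(n)*(|n|*4) for odd n.
import Mathlib
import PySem

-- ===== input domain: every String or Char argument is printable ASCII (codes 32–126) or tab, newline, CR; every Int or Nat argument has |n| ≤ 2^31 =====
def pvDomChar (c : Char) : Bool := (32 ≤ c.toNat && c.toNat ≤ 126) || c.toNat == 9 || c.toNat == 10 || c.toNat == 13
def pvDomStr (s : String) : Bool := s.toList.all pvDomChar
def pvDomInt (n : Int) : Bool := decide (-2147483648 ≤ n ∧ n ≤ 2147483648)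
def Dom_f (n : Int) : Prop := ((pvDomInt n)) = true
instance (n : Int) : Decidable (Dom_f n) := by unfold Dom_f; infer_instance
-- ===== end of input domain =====

-- B replaces A's bin()/string-append/int(...,2) string surgery by a closed-form arithmetic
-- formula (objective: simpler). bin() and int(·, 2) are ported by hand below, step for step;
-- the int(·, 2) port is exact on the "±0b(0|1)+" strings A builds (no whitespace/underscores
-- ever reach it), which is the only shape this function produces.

-- ===== PORT A =====
-- binary digits of a positive Nat, most significant first (empty for 0)
def goBin : Nat → List Char
  | 0 => []
  | m + 1 => goBin ((m + 1) / 2) ++ [if (m + 1) % 2 = 1 then '1' else '0']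
decreasing_by exact Nat.div_lt_self (Nat.succ_pos m) (by omega)

-- format(m, 'b') for a Nat
def natBin (m : Nat) : List Char := if m = 0 then ['0'] else goBin m

-- bin(n): "0b"+digits, '-' outside for negatives (hand port of CPython's bin)
def pyBin0b (n : Int) : List Char :=
  if n < 0 then '-' :: '0' :: 'b' :: natBin n.natAbs else '0' :: 'b' :: natBin n.toNat

-- digit fold of int(s, 2) over the binary digits
def binVal (acc : Nat) (ds : List Char) : Nat :=
  ds.foldl (fun a c => 2 * a + (if c = '1' then 1 else 0)) acc

-- int(s, 2): strip sign and the "0b" prefix, fold the digits; exact on the ±0b(0|1)+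
-- strings produced by pyBin0b ++ suffix (the only inputs it receives here)
def parseBin2 (cs : List Char) : Int :=
  match cs with
  | '-' :: '0' :: 'b' :: ds => -(binVal 0 ds : Int)
  | '0' :: 'b' :: ds => (binVal 0 ds : Int)
  | _ => 0

def f (n : Int) : Int :=
  let bin_str := pyBin0b n
  let bin_str := (PySem.List.pyRange 0 2 1).foldl
    (fun s _ => if PySem.Int.mod n 2 = 0 then s ++ ['1', '1'] else s ++ ['0']) bin_str
  parseBin2 bin_str

-- ===== PORT B =====
def f_alt (n : Int) : Int :=
  let sign : Int := if n < 0 then -1 else 1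
  let a : Int := |n|
  if PySem.Int.mod n 2 = 0 then sign * (a * 16 + 15) else sign * (a * 4)

-- ===== PRECONDITION & SPEC =====
def Spec_f (n : Int) (out : Int) : Prop := out = f_alt n
instance (n : Int) (out : Int) : Decidable (Spec_f n out) := by unfold Spec_f; infer_instance

-- ===== CLAIM (what is proved, stated in full; the proofs are below) =====
def Claim_equal_f : Prop := ∀ (n : Int), Dom_f n → Spec_f n (f n)

-- ===== LEMMAS AND PROOFS =====

theorem binVal_append (acc : Nat) (xs ys : List Char) :
    binVal acc (xs ++ ys) = binVal (binVal acc xs) ys := by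
  simp [binVal, List.foldl_append]

theorem binVal_goBin (m : Nat) : binVal 0 (goBin m) = m := by
  induction m using Nat.strong_induction_on with
  | _ m ih =>
    match m with
    | 0 => simp [goBin, binVal]
    | m + 1 =>
      rw [goBin, binVal_append, ih ((m + 1) / 2) (Nat.div_lt_self (Nat.succ_pos m) (by omega))]
      rcases Nat.mod_two_eq_zero_or_one (m + 1) with h | h <;>
        simp [binVal, h] <;> omega

theorem binVal_natBin (m : Nat) : binVal 0 (natBin m) = m := by
  unfold natBin
  split
  · simp_all [binVal]
  · exact binVal_goBin m

theorem binVal_suffix_even (m : Nat) : binVal m ['1', '1', '1', '1'] = 16 * m + 15 := by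
  simp [binVal, List.foldl]; ring

theorem binVal_suffix_odd (m : Nat) : binVal m ['0', '0'] = 4 * m := by
  simp [binVal, List.foldl]; ring

-- ===== VERDICT (by name: the statement is the Claim_ definition above) =====
theorem f_spec : Claim_equal_f := by
  intro n _
  show f n = f_alt n
  have hrange : PySem.List.pyRange 0 2 1 = [0, 1] := by decide
  unfold f f_alt pyBin0b
  rw [hrange]
  by_cases hm : PySem.Int.mod n 2 = 0 <;> by_cases hn : n < 0 <;>
    simp only [hm, hn, List.foldl, if_true, if_false, ite_true, ite_false,
      List.append_assoc, List.cons_append, List.nil_append]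
  · -- even, negative
    show -(binVal 0 (natBin n.natAbs ++ (['1','1'] ++ ['1','1'])) : Int) = -1 * (|n| * 16 + 15)
    rw [show (['1','1'] ++ ['1','1'] : List Char) = ['1','1','1','1'] from rfl,
      binVal_append, binVal_natBin, binVal_suffix_even]
    have : |n| = -n := abs_of_neg hn
    push_cast [this]
    omega
  · -- even, nonnegative
    show (binVal 0 (natBin n.toNat ++ (['1','1'] ++ ['1','1'])) : Int) = 1 * (|n| * 16 + 15)
    rw [show (['1','1'] ++ ['1','1'] : List Char) = ['1','1','1','1'] from rfl,
      binVal_append, binVal_natBin, binVal_suffix_even]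
    have : |n| = n := abs_of_nonneg (by omega)
    push_cast [this]
    omega
  · -- odd, negative
    show -(binVal 0 (natBin n.natAbs ++ (['0'] ++ ['0'])) : Int) = -1 * (|n| * 4)
    rw [show (['0'] ++ ['0'] : List Char) = ['0','0'] from rfl,
      binVal_append, binVal_natBin, binVal_suffix_odd]
    have : |n| = -n := abs_of_neg hn
    push_cast [this]
    omega
  · -- odd, nonnegative
    show (binVal 0 (natBin n.toNat ++ (['0'] ++ ['0'])) : Int) = 1 * (|n| * 4)
    rw [show (['0'] ++ ['0'] : List Char) = ['0','0'] from rfl,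
      binVal_append, binVal_natBin, binVal_suffix_odd]
    have : |n| = n := abs_of_nonneg (by omega)
    push_cast [this]
    omega
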